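-- pv_equiv track=rewrite | github.com/FatmaElMahdi1000/Learn-to-Code-by-Solving-Problems-Book | Chapter5/.ipynb_checkpoints/Cezar-checkpoint.py | playing_Cards
-- ===== SOURCE A (Python) =====
-- def playing_Cards(N, cards):
--     Full_deck_cards = ['2', '3', '4', '5', '6', '7', '8', '9', '10','A', 'J', 'K', 'Q'] * 4
--     cards_left_in_theDeck = Full_deck_cards.copy()
--     for card in cards:
--         if card in cards_left_in_theDeck:
--             cards_left_in_theDeck.remove(card)
--
--     sum_of_left_deckCard = 0
--     def card_value(card):
--         if card == 'A':
--             return 11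
--         elif card in ['J', 'K', 'Q']:
--             return 10
--         else:
--             return int(card)
--     drawn_cards_sum = 0
--     for card in cards:
--         drawn_cards_sum = drawn_cards_sum + card_value(card)
--     x = 21 - drawn_cards_sum
--
--     safe_count = 0
--     bust_count = 0
--
--     for deckcard in cards_left_in_theDeck:
--         value = card_value(deckcard)
--         if value <= x:
--             safe_count += 1
--         else:
--             bust_count += 1
--
--     if bust_count > safe_count:
--         return "vuci"
--     else:
--         return "dosta"
-- ===== SOURCE B (Python) =====
-- def playing_Cards(N, cards):
--     # One pass over the drawn cards building a sum and a per-card counter,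
--     # then one pass over the 13 card types (remaining = max(0, 4 - drawn count)),
--     # instead of materialising and mutating a 52-card list.
--     def card_value(card):
--         if card == 'A':
--             return 11
--         if card in ('J', 'K', 'Q'):
--             return 10
--         return int(card)
--
--     counts = {}
--     drawn_cards_sum = 0
--     for card in cards:
--         drawn_cards_sum += card_value(card)
--         counts[card] = counts.get(card, 0) + 1
--     x = 21 - drawn_cards_sum
--
--     safe_count = 0
--     bust_count = 0
--     for t in ['2', '3', '4', '5', '6', '7', '8', '9', '10', 'A', 'J', 'K', 'Q']:
--         remaining = max(0, 4 - counts.get(t, 0))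
--         if card_value(t) <= x:
--             safe_count += remaining
--         else:
--             bust_count += remaining
--     return "vuci" if bust_count > safe_count else "dosta"
-- ===== Notes on version B (the rewrite author's own statement) =====
-- stated objective: simpler
-- what changed: Instead of building a 52-card list and removing drawn cards one by one and then scanning the leftover list, B makes one pass over the drawn cards (sum + per-card counter) and then aggregates over the 13 card types with remaining = max(0, 4 - drawn count).
import Mathlib
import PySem

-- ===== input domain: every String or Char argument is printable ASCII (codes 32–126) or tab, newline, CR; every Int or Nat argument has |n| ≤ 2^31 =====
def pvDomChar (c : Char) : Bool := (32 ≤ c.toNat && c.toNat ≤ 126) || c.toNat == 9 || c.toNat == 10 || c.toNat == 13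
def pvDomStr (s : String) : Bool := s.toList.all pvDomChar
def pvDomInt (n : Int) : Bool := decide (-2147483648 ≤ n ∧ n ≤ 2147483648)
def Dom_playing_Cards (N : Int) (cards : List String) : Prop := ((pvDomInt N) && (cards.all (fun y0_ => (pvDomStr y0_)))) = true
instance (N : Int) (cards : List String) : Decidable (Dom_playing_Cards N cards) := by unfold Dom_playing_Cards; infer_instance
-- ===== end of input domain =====

-- B replaces A's 52-card list and one-by-one removal by a single pass over the drawn
-- cards (sum + counter) and an aggregation over the 13 card types (objective: simpler).

-- ===== PORT A =====
-- the 13 card strings (Python's list literal); Full_deck_cards = that list * 4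
def pvCardTypes : List String := ["2", "3", "4", "5", "6", "7", "8", "9", "10", "A", "J", "K", "Q"]

def pvFullDeck : List String := pvCardTypes ++ pvCardTypes ++ pvCardTypes ++ pvCardTypes

-- card_value; (PySem.Int.ofStr? card) = none is Python's ValueError, excluded by Pre_
def pvCardValue (card : String) : Int :=
  if card = "A" then 11
  else if card = "J" ∨ card = "K" ∨ card = "Q" then 10
  else (PySem.Int.ofStr? card).getD 0

-- body of A's removal loop: 'if card in deck: deck.remove(card)'
def pvRemoveStep (deck : List String) (card : String) : List String :=
  if deck.contains card then (PySem.List.remove? deck card).getD deck else deck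

def playing_Cards (N : Int) (cards : List String) : String :=
  let deck := cards.foldl pvRemoveStep pvFullDeck
  let drawnSum := cards.foldl (fun s card => s + pvCardValue card) 0
  let x := 21 - drawnSum
  let sb := deck.foldl
    (fun (sb : Int × Int) c => if pvCardValue c ≤ x then (sb.1 + 1, sb.2) else (sb.1, sb.2 + 1))
    (0, 0)
  if sb.2 > sb.1 then "vuci" else "dosta"

-- ===== PORT B =====
def playing_Cards_alt (N : Int) (cards : List String) : String :=
  let st := cards.foldl
    (fun (p : Int × PySem.Dict String Int) card =>
      (p.1 + pvCardValue card, p.2.insert card (p.2.getD card 0 + 1)))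
    (0, PySem.Dict.empty)
  let x := 21 - st.1
  let sb := pvCardTypes.foldl
    (fun (sb : Int × Int) t =>
      let r := max 0 (4 - st.2.getD t 0)
      if pvCardValue t ≤ x then (sb.1 + r, sb.2) else (sb.1, sb.2 + r))
    (0, 0)
  if sb.2 > sb.1 then "vuci" else "dosta"

-- ===== PRECONDITION & SPEC =====
-- Pre_ excludes exactly the inputs where Python's int(card) raises ValueError:
-- every drawn card must be A/J/K/Q or an int-parseable string.
def Pre_playing_Cards (N : Int) (cards : List String) : Prop :=
  ∀ card ∈ cards,
    card = "A" ∨ card = "J" ∨ card = "K" ∨ card = "Q" ∨ (PySem.Int.ofStr? card).isSome = true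
instance (N : Int) (cards : List String) : Decidable (Pre_playing_Cards N cards) := by
  unfold Pre_playing_Cards; infer_instance

def pvWitness_playing_Cards : Int × List String := (4, ["10", "A", "3"])

def Spec_playing_Cards (N : Int) (cards : List String) (out : String) : Prop := out = playing_Cards_alt N cards
instance (N : Int) (cards : List String) (out : String) : Decidable (Spec_playing_Cards N cards out) := by unfold Spec_playing_Cards; infer_instance

-- ===== CLAIM (what is proved, stated in full; the proofs are below) =====
def Claim_equal_playing_Cards : Prop := ∀ (N : Int) (cards : List String), Dom_playing_Cards N cards → Pre_playing_Cards N cards → Spec_playing_Cards N cards (playing_Cards N cards)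

-- ===== LEMMAS AND PROOFS =====

-- one removal step subtracts (at most) one from the count of the removed card
theorem pv_count_removeStep (d : List String) (c s : String) :
    List.count s (pvRemoveStep d c) = List.count s d - (if s = c then 1 else 0) := by
  unfold pvRemoveStep
  by_cases hc : c ∈ d
  · rw [if_pos (by simpa using hc), PySem.List.remove?_eq_some_erase d c hc, Option.getD_some,
      List.count_erase]
    by_cases h : s = c
    · subst h; simp
    · have h' : ¬ c = s := fun hh => h hh.symm
      simp [h, h']
  · rw [if_neg (by simpa using hc)]
    by_cases h : s = c
    · subst h
      simp [List.count_eq_zero.mpr hc]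
    · simp [h]

theorem pv_count_foldl_removeStep (cs : List String) :
    ∀ (d : List String) (s : String),
      List.count s (cs.foldl pvRemoveStep d) = List.count s d - List.count s cs := by
  induction cs with
  | nil => simp
  | cons c cs ih =>
    intro d s
    rw [List.foldl_cons, ih, pv_count_removeStep, List.count_cons]
    by_cases h : s = c
    · subst h; simp; omega
    · have h' : ¬ c = s := fun hh => h hh.symm
      simp [h, h']

theorem pv_mem_foldl_removeStep (cs : List String) :
    ∀ (d : List String) (x : String), x ∈ cs.foldl pvRemoveStep d → x ∈ d := by
  induction cs with
  | nil => simp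
  | cons c cs ih =>
    intro d x hx
    have hx' := ih _ _ hx
    unfold pvRemoveStep at hx'
    by_cases hc : c ∈ d
    · rw [if_pos (by simpa using hc), PySem.List.remove?_eq_some_erase d c hc,
        Option.getD_some] at hx'
      exact List.mem_of_mem_erase hx'
    · rwa [if_neg (by simpa using hc)] at hx'

-- A's counting loop computes (countP safe, countP bust)
theorem pv_foldA (x : Int) (d : List String) :
    ∀ (a b : Int),
      d.foldl (fun (sb : Int × Int) c =>
          if pvCardValue c ≤ x then (sb.1 + 1, sb.2) else (sb.1, sb.2 + 1)) (a, b)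
        = (a + (d.countP (fun c => decide (pvCardValue c ≤ x)) : Int),
           b + (d.countP (fun c => decide (¬ pvCardValue c ≤ x)) : Int)) := by
  induction d with
  | nil => simp
  | cons c d ih =>
    intro a b
    rw [List.foldl_cons]
    by_cases h : pvCardValue c ≤ x
    · simp [h, ih]; ring
    · have h2 : x < pvCardValue c := lt_of_not_ge h
      simp [h, h2, ih]; ring

-- B's loop over the 13 types computes the two sums (stated with the loop-local r substituted)
theorem pv_foldB (x : Int) (m : PySem.Dict String Int) (T : List String) :
    ∀ (a b : Int),
      T.foldl (fun (sb : Int × Int) t =>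
          if pvCardValue t ≤ x then (sb.1 + max 0 (4 - m.getD t 0), sb.2)
          else (sb.1, sb.2 + max 0 (4 - m.getD t 0))) (a, b)
        = (a + (T.map (fun t => if pvCardValue t ≤ x then max 0 (4 - m.getD t 0) else 0)).sum,
           b + (T.map (fun t => if pvCardValue t ≤ x then 0 else max 0 (4 - m.getD t 0))).sum) := by
  induction T with
  | nil => simp
  | cons t T ih =>
    intro a b
    rw [List.foldl_cons]
    by_cases h : pvCardValue t ≤ x <;> simp [h, ih] <;> ring

-- B's single pass splits into the drawn-card sum and the counter of the drawn cards
theorem pv_split_pass (cards : List String) :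
    cards.foldl (fun (p : Int × PySem.Dict String Int) card =>
        (p.1 + pvCardValue card, p.2.insert card (p.2.getD card 0 + 1))) (0, PySem.Dict.empty)
      = (cards.foldl (fun s card => s + pvCardValue card) 0, PySem.Dict.counter cards) := by
  rw [← PySem.Dict.foldl_insert_getD_add_one_eq_counter]
  exact PySem.List.foldl_prod_mk (fun (s : Int) card => s + pvCardValue card)
    (fun (d : PySem.Dict String Int) card => d.insert card (d.getD card 0 + 1))
    cards 0 PySem.Dict.empty

theorem pv_sum_map_add {α : Type} (T : List α) (g h : α → Nat) :
    (T.map (fun t => g t + h t)).sum = (T.map g).sum + (T.map h).sum := by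
  induction T with
  | nil => simp
  | cons t T ih => simp [ih]; omega

theorem pv_sum_indicator {α : Type} [DecidableEq α] (q : α → Bool) (c : α) :
    ∀ (T : List α), T.Nodup → c ∈ T →
      (T.map (fun t => if q t ∧ t = c then 1 else 0)).sum = (if q c then (1 : Nat) else 0) := by
  intro T
  induction T with
  | nil => simp
  | cons t T ih =>
    intro hnd hc
    have hnd' := List.nodup_cons.mp hnd
    rcases List.mem_cons.mp hc with h | h
    · cases h
      have hz : (T.map (fun t' => if q t' ∧ t' = c then 1 else 0)).sum = 0 := by
        rw [List.map_congr_left (g := fun _ => (0 : Nat))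
          (fun t' ht' => by
            have hne : t' ≠ c := fun he => hnd'.1 (he ▸ ht')
            simp [hne])]
        simp
      by_cases hq : q c = true <;> simp [hq, hz]
    · have ht : ¬ (q t = true ∧ t = c) := by
        rintro ⟨_, rfl⟩; exact hnd'.1 h
      rw [List.map_cons, List.sum_cons, if_neg ht, ih hnd'.2 h]
      omega

-- a countP over a list with elements among T (nodup) is the count-weighted sum over T
theorem pv_countP_eq_sum (q : String → Bool) (T : List String) (hT : T.Nodup) :
    ∀ (d : List String), (∀ s ∈ d, s ∈ T) →
      d.countP q = (T.map (fun t => if q t then List.count t d else 0)).sum := by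
  intro d
  induction d with
  | nil => intro _; simp
  | cons c d ih =>
    intro h
    have hc : c ∈ T := h c (by simp)
    have hrest : ∀ s ∈ d, s ∈ T := fun s hs => h s (List.mem_cons_of_mem _ hs)
    rw [List.countP_cons, ih hrest]
    have hsplit :
        (T.map (fun t => if q t then List.count t (c :: d) else 0)).sum
          = (T.map (fun t => if q t then List.count t d else 0)).sum
            + (T.map (fun t => if q t ∧ t = c then 1 else 0)).sum := by
      rw [← pv_sum_map_add]
      apply congrArg
      apply List.map_congr_left
      intro t _
      rw [List.count_cons]
      by_cases he : t = c
      · subst he; by_cases hq : q t = true <;> simp [hq]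
      · have he' : ¬ c = t := fun hh => he hh.symm
        by_cases hq : q t = true <;> simp [hq, he, he']
    rw [hsplit, pv_sum_indicator q c T hT hc]

theorem pv_mem_fullDeck (s : String) (h : s ∈ pvFullDeck) : s ∈ pvCardTypes := by
  simp only [pvFullDeck, List.mem_append] at h
  tauto

theorem pv_nodup_types : pvCardTypes.Nodup := by decide

theorem pv_count_fullDeck : ∀ t ∈ pvCardTypes, List.count t pvFullDeck = 4 := by decide

-- cast a Nat-valued indicator sum to the Int sums B computes
theorem pv_cast_sum (f : String → Nat) (T : List String) :
    ((T.map f).sum : Int) = (T.map (fun t => (f t : Int))).sum := by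
  induction T with
  | nil => simp
  | cons t T ih => simp [ih]

-- ===== VERDICT (by name: the statement is the Claim_ definition above) =====
theorem playing_Cards_spec : Claim_equal_playing_Cards := by
  intro N cards _ _
  unfold Spec_playing_Cards playing_Cards playing_Cards_alt
  simp only [pv_split_pass]
  set x : Int := 21 - cards.foldl (fun s card => s + pvCardValue card) 0 with hx
  set D : List String := cards.foldl pvRemoveStep pvFullDeck with hD
  have hsub : ∀ s ∈ D, s ∈ pvCardTypes := fun s hs =>
    pv_mem_fullDeck s (pv_mem_foldl_removeStep cards pvFullDeck s hs)
  have hcnt : ∀ t ∈ pvCardTypes,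
      ((List.count t D : Nat) : Int) = max 0 (4 - (PySem.Dict.counter cards).getD t 0) := by
    intro t ht
    rw [hD, pv_count_foldl_removeStep, pv_count_fullDeck t ht, PySem.Dict.getD_counter]
    omega
  rw [pv_foldA x D 0 0, pv_foldB x (PySem.Dict.counter cards) pvCardTypes 0 0]
  have hsafe :
      ((D.countP (fun c => decide (pvCardValue c ≤ x)) : Nat) : Int)
        = (pvCardTypes.map (fun t =>
            if pvCardValue t ≤ x then max 0 (4 - (PySem.Dict.counter cards).getD t 0) else 0)).sum := by
    rw [pv_countP_eq_sum _ pvCardTypes pv_nodup_types D hsub, pv_cast_sum]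
    apply congrArg
    apply List.map_congr_left
    intro t ht
    by_cases h : pvCardValue t ≤ x <;> simp [h, hcnt t ht]
  have hbust :
      ((D.countP (fun c => decide (¬ pvCardValue c ≤ x)) : Nat) : Int)
        = (pvCardTypes.map (fun t =>
            if pvCardValue t ≤ x then 0 else max 0 (4 - (PySem.Dict.counter cards).getD t 0))).sum := by
    rw [pv_countP_eq_sum _ pvCardTypes pv_nodup_types D hsub, pv_cast_sum]
    apply congrArg
    apply List.map_congr_left
    intro t ht
    by_cases h : pvCardValue t ≤ x <;> simp [h, hcnt t ht]
  rw [hsafe, hbust]
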